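-- pv_equiv track=rewrite | github.com/r3coder/vodka-ai-contest-1-reversi | Agents/LHM.py | LocalGetDirectionPositions
-- ===== SOURCE A (Python) =====
-- def LocalGetDirectionPositions(direction, pos, includeSelf=False):
--     assert type(direction) is int and direction >= 0 and direction <= 7
--     assert type(pos) is tuple
--     assert type(pos[0]) is int and pos[0] >= 0 and pos[0] <= 7
--     assert type(pos[1]) is int and pos[1] >= 0 and pos[1] <= 7
--     assert type(includeSelf) is bool
--
--     out = list()
--     if includeSelf:
--         out.append(pos)
--     while True:
--         if   direction == 0:
--             pos = (pos[0]+1, pos[1]  )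
--         elif direction == 1:
--             pos = (pos[0]+1, pos[1]+1)
--         elif direction == 2:
--             pos = (pos[0]  , pos[1]+1)
--         elif direction == 3:
--             pos = (pos[0]-1, pos[1]+1)
--         elif direction == 4:
--             pos = (pos[0]-1, pos[1]  )
--         elif direction == 5:
--             pos = (pos[0]-1, pos[1]-1)
--         elif direction == 6:
--             pos = (pos[0]  , pos[1]-1)
--         elif direction == 7:
--             pos = (pos[0]+1, pos[1]-1)
--         if pos[0] > 7 or pos[1] > 7 or pos[0] < 0 or pos[1] < 0:
--             break
--         out.append(pos)
--     return out
-- ===== SOURCE B (Python) =====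
-- def LocalGetDirectionPositions(direction, pos, includeSelf=False):
--     assert type(direction) is int and direction >= 0 and direction <= 7
--     assert type(pos) is tuple
--     assert type(pos[0]) is int and pos[0] >= 0 and pos[0] <= 7
--     assert type(pos[1]) is int and pos[1] >= 0 and pos[1] <= 7
--     assert type(includeSelf) is bool
--
--     dx, dy = [(1, 0), (1, 1), (0, 1), (-1, 1),
--               (-1, 0), (-1, -1), (0, -1), (1, -1)][direction]
--     bx = 7 - pos[0] if dx > 0 else (pos[0] if dx < 0 else 8)
--     by = 7 - pos[1] if dy > 0 else (pos[1] if dy < 0 else 8)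
--     steps = min(bx, by)
--     head = [pos] if includeSelf else []
--     return head + [(pos[0] + dx * i, pos[1] + dy * i) for i in range(1, steps + 1)]
-- ===== Notes on version B (the rewrite author's own statement) =====
-- stated objective: alternative
-- what changed: Replaced the cell-by-cell while loop with a delta table and a closed-form step count (min of the edge distances along the bounded axes), generating the result with one range comprehension.
import Mathlib
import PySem

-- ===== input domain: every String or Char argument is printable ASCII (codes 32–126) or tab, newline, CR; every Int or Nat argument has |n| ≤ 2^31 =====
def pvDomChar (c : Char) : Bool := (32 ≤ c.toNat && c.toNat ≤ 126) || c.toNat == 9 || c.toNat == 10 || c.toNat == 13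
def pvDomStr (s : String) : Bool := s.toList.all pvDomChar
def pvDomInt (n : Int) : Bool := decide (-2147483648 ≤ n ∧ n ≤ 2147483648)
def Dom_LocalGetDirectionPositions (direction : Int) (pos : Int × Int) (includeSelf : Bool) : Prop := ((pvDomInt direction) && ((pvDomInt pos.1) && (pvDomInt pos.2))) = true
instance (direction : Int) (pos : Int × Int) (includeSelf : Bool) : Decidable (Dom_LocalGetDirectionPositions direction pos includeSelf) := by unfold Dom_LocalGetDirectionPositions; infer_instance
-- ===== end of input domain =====

-- B replaces A's cell-by-cell while loop with a delta table and a closed-form step count (objective: alternative decomposition).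

-- ===== PORT A =====
-- one iteration of the while-loop's if/elif chain, updating pos
def pvStepA (direction : Int) (pos : Int × Int) : Int × Int :=
  if direction == 0 then (pos.1 + 1, pos.2)
  else if direction == 1 then (pos.1 + 1, pos.2 + 1)
  else if direction == 2 then (pos.1, pos.2 + 1)
  else if direction == 3 then (pos.1 - 1, pos.2 + 1)
  else if direction == 4 then (pos.1 - 1, pos.2)
  else if direction == 5 then (pos.1 - 1, pos.2 - 1)
  else if direction == 6 then (pos.1, pos.2 - 1)
  else if direction == 7 then (pos.1 + 1, pos.2 - 1)
  else pos

-- the while-loop; fuel 16 only makes it total (8 iterations suffice on the 8×8 board admitted by Pre_)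
def pvLoopA (fuel : Nat) (direction : Int) (pos : Int × Int) (out : List (Int × Int)) : List (Int × Int) :=
  match fuel with
  | 0 => out
  | f + 1 =>
    let p := pvStepA direction pos
    if p.1 > 7 || p.2 > 7 || p.1 < 0 || p.2 < 0 then out
    else pvLoopA f direction p (out ++ [p])

def LocalGetDirectionPositions (direction : Int) (pos : Int × Int) (includeSelf : Bool) : List (Int × Int) :=
  pvLoopA 16 direction pos (if includeSelf then [pos] else [])

-- ===== PORT B =====
def LocalGetDirectionPositions_alt (direction : Int) (pos : Int × Int) (includeSelf : Bool) : List (Int × Int) :=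
  -- list indexing; .getD (0,0) is unreachable under Pre_ (0 ≤ direction ≤ 7)
  let d := (PySem.List.pyGet? [((1 : Int), (0 : Int)), (1, 1), (0, 1), (-1, 1), (-1, 0), (-1, -1), (0, -1), (1, -1)] direction).getD (0, 0)
  let bx := if d.1 > 0 then 7 - pos.1 else if d.1 < 0 then pos.1 else 8
  let by_ := if d.2 > 0 then 7 - pos.2 else if d.2 < 0 then pos.2 else 8
  let steps := min bx by_
  let head := if includeSelf then [pos] else []
  head ++ (PySem.List.pyRange 1 (steps + 1) 1).map (fun i => (pos.1 + d.1 * i, pos.2 + d.2 * i))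

-- ===== PRECONDITION & SPEC =====
-- Pre_ is exactly A's asserts: direction in 0..7 and pos on the 8×8 board (A raises AssertionError otherwise)
def Pre_LocalGetDirectionPositions (direction : Int) (pos : Int × Int) (includeSelf : Bool) : Prop :=
  0 ≤ direction ∧ direction ≤ 7 ∧ 0 ≤ pos.1 ∧ pos.1 ≤ 7 ∧ 0 ≤ pos.2 ∧ pos.2 ≤ 7
instance (direction : Int) (pos : Int × Int) (includeSelf : Bool) : Decidable (Pre_LocalGetDirectionPositions direction pos includeSelf) := by unfold Pre_LocalGetDirectionPositions; infer_instance

def pvWitness_LocalGetDirectionPositions : Int × (Int × Int) × Bool := (3, (4, 2), true)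

def Spec_LocalGetDirectionPositions (direction : Int) (pos : Int × Int) (includeSelf : Bool) (out : List (Int × Int)) : Prop := out = LocalGetDirectionPositions_alt direction pos includeSelf
instance (direction : Int) (pos : Int × Int) (includeSelf : Bool) (out : List (Int × Int)) : Decidable (Spec_LocalGetDirectionPositions direction pos includeSelf out) := by unfold Spec_LocalGetDirectionPositions; infer_instance

-- ===== CLAIM (what is proved, stated in full; the proofs are below) =====
def Claim_equal_LocalGetDirectionPositions : Prop := ∀ (direction : Int) (pos : Int × Int) (includeSelf : Bool), Dom_LocalGetDirectionPositions direction pos includeSelf → Pre_LocalGetDirectionPositions direction pos includeSelf → Spec_LocalGetDirectionPositions direction pos includeSelf (LocalGetDirectionPositions direction pos includeSelf)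

-- ===== LEMMAS AND PROOFS =====
theorem pvKey : ∀ d < 8, ∀ x < 8, ∀ y < 8, ∀ b : Bool,
    LocalGetDirectionPositions (d : Nat) ((x : Nat), (y : Nat)) b
      = LocalGetDirectionPositions_alt (d : Nat) ((x : Nat), (y : Nat)) b := by decide

-- ===== VERDICT (by name: the statement is the Claim_ definition above) =====
theorem LocalGetDirectionPositions_spec : Claim_equal_LocalGetDirectionPositions := by
  intro direction pos includeSelf _ hpre
  obtain ⟨h0, h1, h2, h3, h4, h5⟩ := hpre
  have hd : direction = ((direction.toNat : Nat) : Int) := (Int.toNat_of_nonneg h0).symm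
  have hx : pos.1 = ((pos.1.toNat : Nat) : Int) := (Int.toNat_of_nonneg h2).symm
  have hy : pos.2 = ((pos.2.toNat : Nat) : Int) := (Int.toNat_of_nonneg h4).symm
  have := pvKey direction.toNat (by omega) pos.1.toNat (by omega) pos.2.toNat (by omega) includeSelf
  unfold Spec_LocalGetDirectionPositions
  have hpos : pos = (((pos.1.toNat : Nat) : Int), ((pos.2.toNat : Nat) : Int)) := by
    rw [← hx, ← hy]
  rw [hd, hpos]
  exact this
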